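-- pv_equiv track=rewrite | github.com/PiotrBra/PythonCourse | reduction/utils.py | bal
-- ===== SOURCE A (Python) =====
-- def bal(expr, op):
--     parenthesis_count = 0  # Parenthesis counter
--     for i in range(len(expr) - 1, -1, -1):
--         if expr[i] == ")":
--             parenthesis_count += 1
--         elif expr[i] == "(":
--             parenthesis_count -= 1
--         elif expr[i] == op and parenthesis_count == 0:
--             return i
--     return None
-- ===== SOURCE B (Python) =====
-- def bal(expr, op):
--     total = expr.count(")") - expr.count("(")
--     balance = 0
--     result = None
--     for i, ch in enumerate(expr):
--         if ch == ")":
--             balance += 1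
--         elif ch == "(":
--             balance -= 1
--         elif ch == op and balance == total:
--             result = i
--     return result
-- ===== Notes on version B (the rewrite author's own statement) =====
-- stated objective: alternative
-- what changed: Replaces the right-to-left scan with early return by a single left-to-right pass that precomputes the whole-string paren balance with str.count and keeps the last index where the running prefix balance equals it (i.e. the suffix after i is balanced).
import Mathlib
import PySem

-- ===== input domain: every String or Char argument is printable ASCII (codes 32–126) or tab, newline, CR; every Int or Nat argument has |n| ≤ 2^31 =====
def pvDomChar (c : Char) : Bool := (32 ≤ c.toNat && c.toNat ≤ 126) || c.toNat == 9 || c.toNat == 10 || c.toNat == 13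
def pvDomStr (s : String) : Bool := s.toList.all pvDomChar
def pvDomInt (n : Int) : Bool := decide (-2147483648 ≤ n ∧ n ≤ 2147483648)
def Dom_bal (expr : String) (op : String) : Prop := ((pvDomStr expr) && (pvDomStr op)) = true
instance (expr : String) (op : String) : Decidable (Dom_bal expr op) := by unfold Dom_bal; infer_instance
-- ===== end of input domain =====

-- B replaces A's right-to-left early-return scan by one left-to-right pass with a precomputed total paren balance and a last-match accumulator (objective: alternative decomposition, same cost).
-- precomputed total paren balance and a last-match accumulator (objective: alternative).

-- ===== PORT A =====
-- A's loop 'for i in range(len(expr)-1,-1,-1)': recursion over the reversed char list,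
-- carrying the current index i (counting down) and the parenthesis counter.
def balAuxA (op : String) : List Char → Int → Int → Option Int
  | [], _, _ => none
  | c :: rest, i, pc =>
    if c = ')' then balAuxA op rest (i - 1) (pc + 1)
    else if c = '(' then balAuxA op rest (i - 1) (pc - 1)
    else if String.ofList [c] = op ∧ pc = 0 then some i
    else balAuxA op rest (i - 1) pc

def bal (expr : String) (op : String) : Option Int :=
  balAuxA op expr.toList.reverse ((expr.toList.length : Int) - 1) 0

-- ===== PORT B =====
-- one step of B's left-to-right loop: state = (result so far, running balance)
def balStepB (op : String) (total : Int) (acc : Option Int × Int) (p : Char × Nat) : Option Int × Int :=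
  if p.1 = ')' then (acc.1, acc.2 + 1)
  else if p.1 = '(' then (acc.1, acc.2 - 1)
  else if String.ofList [p.1] = op ∧ acc.2 = total then (some (p.2 : Int), acc.2)
  else acc

def bal_alt (expr : String) (op : String) : Option Int :=
  let cs := expr.toList
  let total : Int := (cs.count ')' : Int) - (cs.count '(' : Int)
  (cs.zipIdx.foldl (balStepB op total) (none, 0)).1

-- ===== PRECONDITION & SPEC =====
def Spec_bal (expr : String) (op : String) (out : Option Int) : Prop := out = bal_alt expr op
instance (expr : String) (op : String) (out : Option Int) : Decidable (Spec_bal expr op out) := by unfold Spec_bal; infer_instance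

-- ===== CLAIM (what is proved, stated in full; the proofs are below) =====
def Claim_equal_bal : Prop := ∀ (expr : String) (op : String), Dom_bal expr op → Spec_bal expr op (bal expr op)

-- ===== LEMMAS AND PROOFS =====

-- signed paren balance of a char list (')' = +1, '(' = -1)
def sbL (l : List Char) : Int := (l.count ')' : Int) - (l.count '(' : Int)

lemma sbL_append (l : List Char) (c : Char) : sbL (l ++ [c]) = sbL l +
    (if c = ')' then 1 else if c = '(' then -1 else 0) := by
  by_cases h1 : c = ')'
  · subst h1; simp only [sbL, List.count_append]; simp; push_cast; ring
  · by_cases h2 : c = '('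
    · subst h2; simp only [sbL, List.count_append]; simp; push_cast; ring
    · simp only [sbL, List.count_append, List.count_singleton]
      simp [h1, h2]

-- the second component of B's fold is the running prefix balance, independent of the result
lemma foldl_snd (op : String) (t : Int) (ps : List (Char × Nat)) :
    ∀ acc : Option Int × Int,
    (ps.foldl (balStepB op t) acc).2 = acc.2 + sbL (ps.map Prod.fst) := by
  induction ps with
  | nil => intro acc; simp [sbL]
  | cons p rest ih =>
    intro acc
    have hstep : sbL (p.1 :: rest.map Prod.fst) = sbL (rest.map Prod.fst) +
        (if p.1 = ')' then 1 else if p.1 = '(' then -1 else 0) := by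
      by_cases h1 : p.1 = ')'
      · simp only [sbL, List.count_cons, h1]; simp; push_cast; ring
      · by_cases h2 : p.1 = '('
        · simp only [sbL, List.count_cons, h2]; simp [h1]; push_cast; ring
        · simp only [sbL, List.count_cons]
          simp [h1, h2]
    simp only [List.foldl_cons, List.map_cons, hstep, balStepB]
    split_ifs with h1 h2 h3 <;> rw [ih] <;> simp <;> ring

-- main correspondence: A's reversed scan with initial counter pc equals B's forward fold
-- whose target total is sbL l + pc
lemma key (op : String) (l : List Char) : ∀ pc : Int,
    balAuxA op l.reverse ((l.length : Int) - 1) pc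
      = (l.zipIdx.foldl (balStepB op (sbL l + pc)) ((none : Option Int), (0 : Int))).1 := by
  induction l using List.reverseRecOn with
  | nil => intro pc; simp [balAuxA]
  | append_singleton l c ih =>
    intro pc
    have hzip : (l ++ [c]).zipIdx = l.zipIdx ++ [(c, l.length)] := by
      simpa using List.zipIdx_append (xs := l) (ys := [c]) (k := 0)
    have hs := sbL_append l c
    have hlen : ((l ++ [c]).length : Int) - 1 = (l.length : Int) := by simp
    have hrev : (l ++ [c]).reverse = c :: l.reverse := by simp
    rw [hrev, hlen, hzip, List.foldl_append]
    by_cases h1 : c = ')'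
    · subst h1
      have ht : sbL (l ++ [')']) + pc = sbL l + (pc + 1) := by rw [hs]; simp; ring
      rw [ht]
      simp only [balAuxA, List.foldl_cons, List.foldl_nil, balStepB]
      simp only [reduceIte]
      exact ih (pc + 1)
    · by_cases h2 : c = '('
      · subst h2
        have ht : sbL (l ++ ['(']) + pc = sbL l + (pc - 1) := by rw [hs]; simp [h1]; ring
        rw [ht]
        simp only [balAuxA, if_neg h1, List.foldl_cons, List.foldl_nil, balStepB]
        simp only [reduceIte]
        exact ih (pc - 1)
      · have ht : sbL (l ++ [c]) + pc = sbL l + pc := by rw [hs]; simp [h1, h2]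
        rw [ht]
        have hbal : (l.zipIdx.foldl (balStepB op (sbL l + pc))
            ((none : Option Int), (0 : Int))).2 = sbL l := by
          rw [foldl_snd, List.zipIdx_map_fst 0 l]; ring
        simp only [balAuxA, List.foldl_cons, List.foldl_nil, balStepB,
          if_neg h1, if_neg h2]
        by_cases h3 : String.ofList [c] = op ∧ pc = 0
        · rw [if_pos h3]
          have hc : String.ofList [c] = op ∧ (l.zipIdx.foldl (balStepB op (sbL l + pc))
              ((none : Option Int), (0 : Int))).2 = sbL l + pc := by
            exact ⟨h3.1, by rw [hbal, h3.2]; ring⟩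
          rw [if_pos hc]
        · rw [if_neg h3]
          have hc : ¬ (String.ofList [c] = op ∧ (l.zipIdx.foldl (balStepB op (sbL l + pc))
              ((none : Option Int), (0 : Int))).2 = sbL l + pc) := by
            rw [hbal]
            rintro ⟨ha, hb⟩
            exact h3 ⟨ha, by omega⟩
          rw [if_neg hc]
          exact ih pc

-- ===== VERDICT (by name: the statement is the Claim_ definition above) =====
theorem bal_spec : Claim_equal_bal := by
  intro expr op _
  unfold Spec_bal bal bal_alt
  simpa [sbL] using key op expr.toList 0
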